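-- pv_equiv track=rewrite | github.com/Chitinghaha/AILab2025 | src/cost/anal/op/Conv.py | calc_load_count
-- ===== SOURCE A (Python) =====
-- def calc_load_count(h_out, w_out, k_h, k_w, stride_h, stride_w, pad_top, pad_left, dilation_h, dilation_w, h_in, w_in, n, c_in, c_out):
--     valid_positions = (
--         1
--         for h in range(h_out)
--         for w in range(w_out)
--         for kh in range(k_h)
--         for kw in range(k_w)
--         if 0 <= (h * stride_h - pad_top + kh * dilation_h) < h_in
--         and 0 <= (w * stride_w - pad_left + kw * dilation_w) < w_in
--     )
--     count = sum(valid_positions)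
--     load = count * n * c_in * c_out
--     return load
-- ===== SOURCE B (Python) =====
-- def _axis_count(m, k, s, p, d, size):
--     # number of pairs (i, j) with 0 <= i < m, 0 <= j < k and 0 <= i*s - p + j*d < size,
--     # computed per kernel offset j by closed-form interval counting (no loop over i)
--     total = 0
--     for j in range(k):
--         low = p - j * d           # need low <= i*s < high
--         high = low + size
--         if s > 0:
--             first = -((-low) // s)
--             last = (high - 1) // s
--         elif s < 0:
--             first = -((-(high - 1)) // s)
--             last = low // s
--         else:
--             total += max(m, 0) if low <= 0 < high else 0
--             continue
--         total += max(0, min(m, last + 1) - max(0, first))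
--     return total
--
--
-- def calc_load_count(h_out, w_out, k_h, k_w, stride_h, stride_w, pad_top, pad_left, dilation_h, dilation_w, h_in, w_in, n, c_in, c_out):
--     if h_out <= 0 or w_out <= 0 or k_h <= 0 or k_w <= 0:
--         return 0  # no output positions or empty kernel: nothing is loaded
--     count_h = _axis_count(h_out, k_h, stride_h, pad_top, dilation_h, h_in)
--     count_w = _axis_count(w_out, k_w, stride_w, pad_left, dilation_w, w_in)
--     return count_h * count_w * n * c_in * c_out
-- ===== Notes on version B (the rewrite author's own statement) =====
-- stated objective: faster
-- what changed: The validity test factorizes per axis, and within each axis B loops only over the kernel offsets, computing the number of valid output positions for each offset in closed form with floor/ceil division interval arithmetic (three sign cases for the stride), then multiplies the two axis counts; A enumerates every (h, w, kh, kw) quadruple.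
import Mathlib
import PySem

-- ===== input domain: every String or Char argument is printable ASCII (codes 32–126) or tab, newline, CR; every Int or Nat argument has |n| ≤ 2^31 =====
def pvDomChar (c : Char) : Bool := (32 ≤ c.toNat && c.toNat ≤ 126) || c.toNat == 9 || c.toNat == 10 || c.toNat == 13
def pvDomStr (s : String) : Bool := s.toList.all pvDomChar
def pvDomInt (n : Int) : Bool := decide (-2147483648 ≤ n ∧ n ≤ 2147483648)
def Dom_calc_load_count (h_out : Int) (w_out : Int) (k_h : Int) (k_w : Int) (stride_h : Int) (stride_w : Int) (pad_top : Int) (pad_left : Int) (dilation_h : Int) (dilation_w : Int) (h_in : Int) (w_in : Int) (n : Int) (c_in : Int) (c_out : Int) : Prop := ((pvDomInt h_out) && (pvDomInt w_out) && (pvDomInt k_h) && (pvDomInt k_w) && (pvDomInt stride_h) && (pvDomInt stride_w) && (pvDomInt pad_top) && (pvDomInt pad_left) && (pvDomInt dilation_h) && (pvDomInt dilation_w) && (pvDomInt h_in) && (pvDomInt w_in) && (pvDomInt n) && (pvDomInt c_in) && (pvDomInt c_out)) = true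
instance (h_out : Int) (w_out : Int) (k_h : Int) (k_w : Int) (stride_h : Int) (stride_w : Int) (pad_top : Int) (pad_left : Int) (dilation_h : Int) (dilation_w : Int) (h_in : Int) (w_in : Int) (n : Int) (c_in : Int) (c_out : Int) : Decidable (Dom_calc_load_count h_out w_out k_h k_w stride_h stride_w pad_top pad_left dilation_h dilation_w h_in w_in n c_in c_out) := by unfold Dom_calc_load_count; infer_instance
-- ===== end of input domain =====

-- B replaces A's four-level loop by per-kernel-offset closed-form interval counts on each axis, multiplied (objective: faster, asymptotic).

-- ===== PORT A =====
-- A: one generator over all (h, w, kh, kw) quadruples, summed, then scaled.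
def calc_load_count (h_out : Int) (w_out : Int) (k_h : Int) (k_w : Int) (stride_h : Int) (stride_w : Int) (pad_top : Int) (pad_left : Int) (dilation_h : Int) (dilation_w : Int) (h_in : Int) (w_in : Int) (n : Int) (c_in : Int) (c_out : Int) : Int :=
  let count : Int :=
    (PySem.List.pyRange 0 h_out 1).foldl (fun acc h =>
      (PySem.List.pyRange 0 w_out 1).foldl (fun acc w =>
        (PySem.List.pyRange 0 k_h 1).foldl (fun acc kh =>
          (PySem.List.pyRange 0 k_w 1).foldl (fun acc kw =>
            if (0 ≤ h * stride_h - pad_top + kh * dilation_h ∧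
                 h * stride_h - pad_top + kh * dilation_h < h_in) ∧
               (0 ≤ w * stride_w - pad_left + kw * dilation_w ∧
                 w * stride_w - pad_left + kw * dilation_w < w_in)
            then acc + 1 else acc) acc) acc) acc) 0
  let load := count * n * c_in * c_out
  load

-- ===== PORT B =====
-- B helper: number of pairs (i, j), 0 ≤ i < m, 0 ≤ j < k, with 0 ≤ i*s - p + j*d < size,
-- computed per kernel offset j by a closed-form interval count (no loop over i).
def pvAxisCount (m : Int) (k : Int) (s : Int) (p : Int) (d : Int) (size : Int) : Int :=
  (PySem.List.pyRange 0 k 1).foldl (fun total j =>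
    let low := p - j * d
    let high := low + size
    total +
      (if s > 0 then
        let first := -(PySem.Int.floordiv (-low) s)
        let last := PySem.Int.floordiv (high - 1) s
        max 0 (min m (last + 1) - max 0 first)
      else if s < 0 then
        let first := -(PySem.Int.floordiv (-(high - 1)) s)
        let last := PySem.Int.floordiv low s
        max 0 (min m (last + 1) - max 0 first)
      else if low ≤ 0 ∧ 0 < high then max m 0 else 0)) 0

def calc_load_count_alt (h_out : Int) (w_out : Int) (k_h : Int) (k_w : Int) (stride_h : Int) (stride_w : Int) (pad_top : Int) (pad_left : Int) (dilation_h : Int) (dilation_w : Int) (h_in : Int) (w_in : Int) (n : Int) (c_in : Int) (c_out : Int) : Int :=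
  -- no output positions or empty kernel: nothing is loaded
  if h_out ≤ 0 ∨ w_out ≤ 0 ∨ k_h ≤ 0 ∨ k_w ≤ 0 then 0 else
  let count_h := pvAxisCount h_out k_h stride_h pad_top dilation_h h_in
  let count_w := pvAxisCount w_out k_w stride_w pad_left dilation_w w_in
  count_h * count_w * n * c_in * c_out

-- ===== PRECONDITION & SPEC =====
def Spec_calc_load_count (h_out : Int) (w_out : Int) (k_h : Int) (k_w : Int) (stride_h : Int) (stride_w : Int) (pad_top : Int) (pad_left : Int) (dilation_h : Int) (dilation_w : Int) (h_in : Int) (w_in : Int) (n : Int) (c_in : Int) (c_out : Int) (out : Int) : Prop := out = calc_load_count_alt h_out w_out k_h k_w stride_h stride_w pad_top pad_left dilation_h dilation_w h_in w_in n c_in c_out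
instance (h_out : Int) (w_out : Int) (k_h : Int) (k_w : Int) (stride_h : Int) (stride_w : Int) (pad_top : Int) (pad_left : Int) (dilation_h : Int) (dilation_w : Int) (h_in : Int) (w_in : Int) (n : Int) (c_in : Int) (c_out : Int) (out : Int) : Decidable (Spec_calc_load_count h_out w_out k_h k_w stride_h stride_w pad_top pad_left dilation_h dilation_w h_in w_in n c_in c_out out) := by unfold Spec_calc_load_count; infer_instance

-- ===== CLAIM (what is proved, stated in full; the proofs are below) =====
def Claim_equal_calc_load_count : Prop := ∀ (h_out : Int) (w_out : Int) (k_h : Int) (k_w : Int) (stride_h : Int) (stride_w : Int) (pad_top : Int) (pad_left : Int) (dilation_h : Int) (dilation_w : Int) (h_in : Int) (w_in : Int) (n : Int) (c_in : Int) (c_out : Int), Dom_calc_load_count h_out w_out k_h k_w stride_h stride_w pad_top pad_left dilation_h dilation_w h_in w_in n c_in c_out → Spec_calc_load_count h_out w_out k_h k_w stride_h stride_w pad_top pad_left dilation_h dilation_w h_in w_in n c_in c_out (calc_load_count h_out w_out k_h k_w stride_h stride_w pad_top pad_left dilation_h dilation_w h_in w_in n c_in c_out)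

-- ===== LEMMAS AND PROOFS =====

-- counting i ∈ range mn with lo ≤ i ≤ hi, closed form
theorem pv_count_interval_nat (mn : Nat) (lo hi : Int) :
    ((List.range mn).countP (fun (i : Nat) => decide (lo ≤ (i : Int) ∧ (i : Int) ≤ hi)) : Int)
      = max 0 (min (mn : Int) (hi + 1) - max 0 lo) := by
  induction mn with
  | zero => simp
  | succ m ih =>
    rw [List.range_succ, List.countP_append]
    have hs : List.countP (fun (i : Nat) => decide (lo ≤ (i : Int) ∧ (i : Int) ≤ hi)) [m]
        = if lo ≤ (m : Int) ∧ (m : Int) ≤ hi then 1 else 0 := by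
      simp [List.countP_cons]
    rw [hs]
    by_cases h : lo ≤ (m : Int) ∧ (m : Int) ≤ hi
    · rw [if_pos h]; omega
    · rw [if_neg h]; omega

theorem pv_count_interval (m lo hi : Int) :
    ((PySem.List.pyRange 0 m 1).countP (fun i => decide (lo ≤ i ∧ i ≤ hi)) : Int)
      = max 0 (min m (hi + 1) - max 0 lo) := by
  rw [PySem.List.pyRange_one, List.countP_map]
  have h0 : ((fun i => decide (lo ≤ i ∧ i ≤ hi)) ∘ (fun k : Nat => (0 : Int) + (k : Int)))
      = fun (k : Nat) => decide (lo ≤ (k : Int) ∧ (k : Int) ≤ hi) := by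
    funext k; simp
  rw [h0, pv_count_interval_nat]
  omega

-- sum of (if p x then c else 0) over a list = (count of p) * c
theorem pv_sum_ite_const (l : List Int) (p : Int → Prop) [DecidablePred p] (c : Int) :
    (l.map (fun x => if p x then c else 0)).sum
      = ((l.countP (fun x => decide (p x)) : Nat) : Int) * c := by
  induction l with
  | nil => simp
  | cons x xs ih =>
    by_cases hx : p x <;> · simp [hx, ih, add_mul]; try ring

theorem pv_countP_and_const (l : List Int) (P : Prop) [Decidable P]
    (q : Int → Prop) [DecidablePred q] :
    l.countP (fun x => decide (P ∧ q x))
      = if P then l.countP (fun x => decide (q x)) else 0 := by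
  by_cases hP : P <;> simp [hP]

-- exchanging the order of a double sum
theorem pv_sum_swap (l1 l2 : List Int) (f : Int → Int → Int) :
    (l1.map (fun x => (l2.map (fun y => f x y)).sum)).sum
      = (l2.map (fun y => (l1.map (fun x => f x y)).sum)).sum := by
  induction l1 with
  | nil => simp
  | cons x t ih => simp [ih, List.sum_map_add]

-- the condition on one axis is an interval condition on i (positive stride)
theorem pv_cond_pos {s : Int} (hs : 0 < s) (low high i : Int) :
    (low ≤ i * s ∧ i * s < high) ↔
      (-(PySem.Int.floordiv (-low) s) ≤ i ∧ i ≤ PySem.Int.floordiv (high - 1) s) := by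
  have h1 : -i ≤ PySem.Int.floordiv (-low) s ↔ (-i) * s ≤ -low :=
    PySem.Int.le_floordiv_iff_mul_le hs
  have h2 : i ≤ PySem.Int.floordiv (high - 1) s ↔ i * s ≤ high - 1 :=
    PySem.Int.le_floordiv_iff_mul_le hs
  have e1 : (-(PySem.Int.floordiv (-low) s) ≤ i) ↔ low ≤ i * s := by
    rw [neg_le, h1, neg_mul]; omega
  rw [e1, h2]
  omega

-- the condition on one axis is an interval condition on i (negative stride)
theorem pv_cond_neg {s : Int} (hs : s < 0) (low high i : Int) :
    (low ≤ i * s ∧ i * s < high) ↔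
      (-(PySem.Int.floordiv (-(high - 1)) s) ≤ i ∧ i ≤ PySem.Int.floordiv low s) := by
  have hpos : 0 < -s := by omega
  have ha : PySem.Int.floordiv (-(high - 1)) s = PySem.Int.floordiv (high - 1) (-s) := by
    have h := PySem.Int.floordiv_neg_neg (high - 1) (-s)
    rw [neg_neg] at h
    exact h
  have hb : PySem.Int.floordiv low s = PySem.Int.floordiv (-low) (-s) := by
    have h := PySem.Int.floordiv_neg_neg (-low) (-s)
    rw [neg_neg, neg_neg] at h
    exact h
  have h1 : -i ≤ PySem.Int.floordiv (high - 1) (-s) ↔ (-i) * (-s) ≤ high - 1 :=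
    PySem.Int.le_floordiv_iff_mul_le hpos
  have h2 : i ≤ PySem.Int.floordiv (-low) (-s) ↔ i * (-s) ≤ -low :=
    PySem.Int.le_floordiv_iff_mul_le hpos
  have e1 : (-(PySem.Int.floordiv (-(high - 1)) s) ≤ i) ↔ i * s < high := by
    rw [ha, neg_le, h1, neg_mul_neg]; omega
  have e2 : (i ≤ PySem.Int.floordiv low s) ↔ low ≤ i * s := by
    rw [hb, h2, mul_neg]; omega
  rw [e1, e2]
  omega

-- pvAxisCount equals the per-offset column sums of the double-loop count
theorem pv_axis (m k s p d size : Int) :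
    pvAxisCount m k s p d size
      = ((PySem.List.pyRange 0 k 1).map (fun j =>
          ((PySem.List.pyRange 0 m 1).countP (fun i =>
            decide (0 ≤ i * s - p + j * d ∧ i * s - p + j * d < size)) : Int))).sum := by
  unfold pvAxisCount
  rw [PySem.List.foldl_add, zero_add]
  refine congrArg List.sum (List.map_congr_left fun j _ => ?_)
  have hcond : ∀ i : Int,
      (0 ≤ i * s - p + j * d ∧ i * s - p + j * d < size)
        ↔ ((p - j * d) ≤ i * s ∧ i * s < (p - j * d) + size) := by
    intro i; omega
  rcases lt_trichotomy s 0 with hneg | hzero | hpos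
  · have hconv : ((PySem.List.pyRange 0 m 1).countP (fun i =>
        decide (0 ≤ i * s - p + j * d ∧ i * s - p + j * d < size)) : Int)
        = ((PySem.List.pyRange 0 m 1).countP (fun i =>
            decide (-(PySem.Int.floordiv (-(p - j * d + size - 1)) s) ≤ i ∧
                    i ≤ PySem.Int.floordiv (p - j * d) s)) : Int) := by
      congr 1
      refine List.countP_congr fun i _ => ?_
      simp only [decide_eq_true_eq]
      exact (hcond i).trans (pv_cond_neg hneg (p - j * d) (p - j * d + size) i)
    rw [hconv, pv_count_interval, if_neg (by omega : ¬ s > 0), if_pos hneg]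
  · subst hzero
    rw [if_neg (by omega : ¬ (0:Int) > 0), if_neg (by omega : ¬ (0:Int) < 0)]
    by_cases hc : p - j * d ≤ 0 ∧ 0 < p - j * d + size
    · rw [if_pos hc]
      have hlen : ((PySem.List.pyRange 0 m 1).countP (fun i =>
          decide (0 ≤ i * 0 - p + j * d ∧ i * 0 - p + j * d < size))) =
          (PySem.List.pyRange 0 m 1).length := by
        apply List.countP_eq_length.mpr
        intro i _
        simp only [decide_eq_true_eq, mul_zero]
        omega
      rw [hlen, PySem.List.length_pyRange_one]
      omega
    · rw [if_neg hc]
      have h0c : ((PySem.List.pyRange 0 m 1).countP (fun i =>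
          decide (0 ≤ i * 0 - p + j * d ∧ i * 0 - p + j * d < size))) = 0 := by
        apply List.countP_eq_zero.mpr
        intro i _
        simp only [decide_eq_true_eq, mul_zero]
        omega
      rw [h0c]
      exact (Nat.cast_zero).symm
  · have hconv : ((PySem.List.pyRange 0 m 1).countP (fun i =>
        decide (0 ≤ i * s - p + j * d ∧ i * s - p + j * d < size)) : Int)
        = ((PySem.List.pyRange 0 m 1).countP (fun i =>
            decide (-(PySem.Int.floordiv (-(p - j * d)) s) ≤ i ∧
                    i ≤ PySem.Int.floordiv (p - j * d + size - 1) s)) : Int) := by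
      congr 1
      refine List.countP_congr fun i _ => ?_
      simp only [decide_eq_true_eq]
      exact (hcond i).trans (pv_cond_pos hpos (p - j * d) (p - j * d + size) i)
    rw [hconv, pv_count_interval, if_pos hpos]

-- pvAxisCount equals the row sums of the double-loop count (after a sum exchange)
theorem pv_axis_rows (m k s p d size : Int) :
    pvAxisCount m k s p d size
      = ((PySem.List.pyRange 0 m 1).map (fun i =>
          ((PySem.List.pyRange 0 k 1).countP (fun j =>
            decide (0 ≤ i * s - p + j * d ∧ i * s - p + j * d < size)) : Int))).sum := by
  rw [pv_axis]
  have hc : ∀ (rng : List Int) (f : Int → Int → Prop) [∀ a b, Decidable (f a b)] (x : Int),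
      ((rng.countP (fun y => decide (f x y)) : Nat) : Int)
        = (rng.map (fun y => if f x y then (1:Int) else 0)).sum := by
    intro rng f _ x
    rw [pv_sum_ite_const rng (fun y => f x y) 1]
    ring
  calc ((PySem.List.pyRange 0 k 1).map (fun j =>
          ((PySem.List.pyRange 0 m 1).countP (fun i =>
            decide (0 ≤ i * s - p + j * d ∧ i * s - p + j * d < size)) : Int))).sum
      = ((PySem.List.pyRange 0 k 1).map (fun j =>
          ((PySem.List.pyRange 0 m 1).map (fun i =>
            if 0 ≤ i * s - p + j * d ∧ i * s - p + j * d < size then (1:Int) else 0)).sum)).sum := by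
        exact congrArg List.sum (List.map_congr_left fun j _ =>
          hc _ (fun j i => 0 ≤ i * s - p + j * d ∧ i * s - p + j * d < size) j)
    _ = ((PySem.List.pyRange 0 m 1).map (fun i =>
          ((PySem.List.pyRange 0 k 1).map (fun j =>
            if 0 ≤ i * s - p + j * d ∧ i * s - p + j * d < size then (1:Int) else 0)).sum)).sum := by
        exact pv_sum_swap _ _ _
    _ = _ := by
        refine congrArg List.sum (List.map_congr_left fun i _ => ?_)
        exact (hc _ (fun i j => 0 ≤ i * s - p + j * d ∧ i * s - p + j * d < size) i).symm

-- ===== VERDICT (by name: the statement is the Claim_ definition above) =====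
theorem calc_load_count_spec : Claim_equal_calc_load_count := by
  intro h_out w_out k_h k_w stride_h stride_w pad_top pad_left dilation_h dilation_w h_in w_in n c_in c_out _
  unfold Spec_calc_load_count calc_load_count calc_load_count_alt
  by_cases hz : h_out ≤ 0 ∨ w_out ≤ 0 ∨ k_h ≤ 0 ∨ k_w ≤ 0
  · rw [if_pos hz]
    rcases hz with h | h | h | h <;>
      simp [PySem.List.pyRange_one_eq_nil h]
  · rw [if_neg hz]
    simp only [PySem.List.foldl_ite_add_one, PySem.List.foldl_add, zero_add]
    rw [pv_axis_rows h_out k_h stride_h pad_top dilation_h h_in,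
        pv_axis_rows w_out k_w stride_w pad_left dilation_w w_in]
    congr 3
    set SQ : Int := ((PySem.List.pyRange 0 w_out 1).map (fun w =>
        ((PySem.List.pyRange 0 k_w 1).countP (fun kw =>
          decide (0 ≤ w * stride_w - pad_left + kw * dilation_w ∧
                   w * stride_w - pad_left + kw * dilation_w < w_in)) : Int))).sum with hSQ
    have hfun : ∀ h : Int,
        ((PySem.List.pyRange 0 w_out 1).map (fun w =>
          ((PySem.List.pyRange 0 k_h 1).map (fun kh =>
            (((PySem.List.pyRange 0 k_w 1).countP (fun kw =>
                decide ((0 ≤ h * stride_h - pad_top + kh * dilation_h ∧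
                          h * stride_h - pad_top + kh * dilation_h < h_in) ∧
                        (0 ≤ w * stride_w - pad_left + kw * dilation_w ∧
                          w * stride_w - pad_left + kw * dilation_w < w_in))) : Nat) : Int))).sum)).sum
        = ((PySem.List.pyRange 0 k_h 1).countP (fun kh =>
            decide (0 ≤ h * stride_h - pad_top + kh * dilation_h ∧
                     h * stride_h - pad_top + kh * dilation_h < h_in)) : Int) * SQ := by
      intro h
      rw [hSQ, ← List.sum_map_mul_left]
      refine congrArg List.sum (List.map_congr_left fun w _ => ?_)
      have hc := pv_sum_ite_const (PySem.List.pyRange 0 k_h 1)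
        (fun kh => 0 ≤ h * stride_h - pad_top + kh * dilation_h ∧
                    h * stride_h - pad_top + kh * dilation_h < h_in)
        (((PySem.List.pyRange 0 k_w 1).countP (fun kw =>
            decide (0 ≤ w * stride_w - pad_left + kw * dilation_w ∧
                     w * stride_w - pad_left + kw * dilation_w < w_in)) : Int))
      refine Eq.trans ?_ hc
      refine congrArg List.sum (List.map_congr_left fun kh _ => ?_)
      rw [pv_countP_and_const]
      split <;> simp
    calc ((PySem.List.pyRange 0 h_out 1).map _).sum
        = ((PySem.List.pyRange 0 h_out 1).map (fun h =>
            ((PySem.List.pyRange 0 k_h 1).countP (fun kh =>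
              decide (0 ≤ h * stride_h - pad_top + kh * dilation_h ∧
                       h * stride_h - pad_top + kh * dilation_h < h_in)) : Int) * SQ)).sum := by
          exact congrArg List.sum (List.map_congr_left (fun h _ => hfun h))
      _ = _ := by rw [List.sum_map_mul_right]
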